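-- pv_equiv track=rewrite | github.com/muratozkan/aoc2018 | day_6.py | area_per_point
-- ===== SOURCE A (Python) =====
-- def area_per_point(m):
--     area = {}
--     h = len(m[0]) - 1
--     w = len(m) - 1
--     for y in range(h + 1):
--         for x in range(w + 1):
--             i, d = m[x][y]
--             if i is not None:
--                 a = area.get(i, 0)
--                 if a == -1:
--                     continue
--
--                 if x == 0 or y == 0 or x == w or y == h:
--                     a = -1
--                 else:
--                     a += 1
--
--                 area[i] = a
--     return area
-- ===== SOURCE B (Python) =====
-- def area_per_point(m):
--     h = len(m[0]) - 1
--     w = len(m) - 1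
--     # Flatten the grid (in A's scan order) into labelled events (label, on_border),
--     # then answer each distinct label by independent queries over the event list.
--     cells = [(m[x][y][0], x == 0 or y == 0 or x == w or y == h)
--              for y in range(h + 1) for x in range(w + 1)]
--     labels = []
--     seen = set()
--     for i, _ in cells:
--         if i is not None and i not in seen:
--             seen.add(i)
--             labels.append(i)
--     return {i: -1 if any(b for j, b in cells if j == i)
--                else sum(1 for j, _ in cells if j == i)
--             for i in labels}
-- ===== Notes on version B (the rewrite author's own statement) =====
-- stated objective: alternative
-- what changed: Instead of A's single stateful grid pass maintaining a dict with a -1 sentinel and skip logic, B flattens the grid into a (label, on_border) event list, collects the distinct labels in first-appearance order, and answers each label by independent any/sum queries over the event list.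
import Mathlib
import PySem

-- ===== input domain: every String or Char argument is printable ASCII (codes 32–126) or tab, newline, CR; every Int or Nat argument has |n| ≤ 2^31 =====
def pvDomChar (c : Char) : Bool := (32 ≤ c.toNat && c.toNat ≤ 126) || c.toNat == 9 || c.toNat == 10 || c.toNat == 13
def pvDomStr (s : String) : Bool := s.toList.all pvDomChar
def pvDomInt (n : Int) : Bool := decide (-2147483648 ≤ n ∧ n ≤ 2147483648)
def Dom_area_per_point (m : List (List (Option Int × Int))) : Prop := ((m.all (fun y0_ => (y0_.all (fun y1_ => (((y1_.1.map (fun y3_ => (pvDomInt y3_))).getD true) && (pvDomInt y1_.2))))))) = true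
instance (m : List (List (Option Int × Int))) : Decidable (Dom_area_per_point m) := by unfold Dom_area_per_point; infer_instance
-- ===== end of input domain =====

-- B replaces A's single stateful grid pass (a dict with a -1 sentinel and skip logic) by:
-- flatten the grid into a (label, on_border) event list, collect the distinct labels in
-- first-appearance order, then answer each label by independent any/count queries over the
-- event list; objective: alternative decomposition, same return value.

-- ===== PORT A =====
def area_per_point (m : List (List (Option Int × Int))) : List (Int × Int) :=
  let h : Int := ((PySem.List.pyGetD m 0 []).length : Int) - 1
  let w : Int := (m.length : Int) - 1
  let area : PySem.Dict Int Int :=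
    (PySem.List.pyRange 0 (h + 1) 1).foldl (fun area y =>
      (PySem.List.pyRange 0 (w + 1) 1).foldl (fun area x =>
        match (PySem.List.pyGetD (PySem.List.pyGetD m x []) y (none, 0)).1 with
        | none => area
        | some i =>
          let a := area.getD i 0
          if a == -1 then area
          else area.insert i (if x == 0 || y == 0 || x == w || y == h then -1 else a + 1))
        area) PySem.Dict.empty
  area.items

-- ===== PORT B =====
-- B's first-appearance label collection ('for i, _ in cells: if i is not None and i not in seen: …')
def bLabelStep (st : PySem.Set Int × List Int) (e : Option Int × Bool) : PySem.Set Int × List Int :=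
  match e.1 with
  | none => st
  | some i => if PySem.Set.contains st.1 i then st else (PySem.Set.add st.1 i, st.2 ++ [i])

def area_per_point_alt (m : List (List (Option Int × Int))) : List (Int × Int) :=
  let h : Int := ((PySem.List.pyGetD m 0 []).length : Int) - 1
  let w : Int := (m.length : Int) - 1
  let cells : List (Option Int × Bool) :=
    (PySem.List.pyRange 0 (h + 1) 1).flatMap (fun y =>
      (PySem.List.pyRange 0 (w + 1) 1).map (fun x =>
        ((PySem.List.pyGetD (PySem.List.pyGetD m x []) y (none, 0)).1,
         x == 0 || y == 0 || x == w || y == h)))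
  let labels : List Int := (cells.foldl bLabelStep (PySem.Set.empty, [])).2
  labels.map (fun i =>
    (i, if cells.any (fun e => e.1 == some i && e.2) then (-1 : Int)
        else (cells.countP (fun e => e.1 == some i) : Int)))

-- ===== PRECONDITION & SPEC =====
-- Pre_ excludes exactly the inputs where Python A raises IndexError: the empty grid (m[0])
-- and ragged grids where some column is shorter than column 0 (m[x][y]).
def Pre_area_per_point (m : List (List (Option Int × Int))) : Prop :=
  m ≠ [] ∧ ∀ row ∈ m, m.headI.length ≤ row.length
instance (m : List (List (Option Int × Int))) : Decidable (Pre_area_per_point m) := by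
  unfold Pre_area_per_point; infer_instance
def pvWitness_area_per_point : (List (List (Option Int × Int))) := [[(some 1, 0)]]
def Spec_area_per_point (m : List (List (Option Int × Int))) (out : List (Int × Int)) : Prop := out = area_per_point_alt m
instance (m : List (List (Option Int × Int))) (out : List (Int × Int)) : Decidable (Spec_area_per_point m out) := by unfold Spec_area_per_point; infer_instance

-- ===== CLAIM (what is proved, stated in full; the proofs are below) =====
def Claim_equal_area_per_point : Prop := ∀ (m : List (List (Option Int × Int))), Dom_area_per_point m → Pre_area_per_point m → Spec_area_per_point m (area_per_point m)

-- ===== LEMMAS AND PROOFS =====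

-- A's dict-update for one event (label, on_border); A's inner loop body is exactly this.
def aStep (area : PySem.Dict Int Int) (e : Option Int × Bool) : PySem.Dict Int Int :=
  match e.1 with
  | none => area
  | some i =>
    let a := area.getD i 0
    if a == -1 then area else area.insert i (if e.2 then -1 else a + 1)

-- the per-label answer B computes from an event list
def bVal (evs : List (Option Int × Bool)) (i : Int) : Int :=
  if evs.any (fun e => e.1 == some i && e.2) then -1 else (evs.countP (fun e => e.1 == some i) : Int)

theorem dict_get?_map_label (labels : List Int) (v : Int → Int) (k : Int) :
    PySem.Dict.get? ⟨labels.map (fun j => (j, v j))⟩ k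
      = if k ∈ labels then some (v k) else none := by
  induction labels with
  | nil => simp [PySem.Dict.get?]
  | cons j t ih =>
    rw [List.map_cons, PySem.Dict.get?_mk_cons]
    by_cases hj : j = k
    · subst hj; simp
    · simp only [beq_iff_eq, hj, if_false, List.mem_cons]
      rw [ih]
      by_cases hk : k ∈ t <;> simp [hk, Ne.symm hj]

theorem set_contains_add (s : PySem.Set Int) (i j : Int) :
    PySem.Set.contains (PySem.Set.add s i) j = (PySem.Set.contains s j || j == i) := by
  by_cases hj : j = i
  · subst hj
    cases h : PySem.Set.contains s j <;> simp_all [PySem.Set.add, PySem.Set.contains]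
  · cases h : PySem.Set.contains s i <;> simp_all [PySem.Set.add, PySem.Set.contains]

-- The joint invariant: A's fold over the events equals B's per-label table, the seen set
-- mirrors the labels list, and a label is listed iff it occurs among the events.
theorem fold_invariant (evs : List (Option Int × Bool)) :
    (evs.foldl aStep PySem.Dict.empty).items
        = ((evs.foldl bLabelStep (PySem.Set.empty, [])).2).map (fun i => (i, bVal evs i))
      ∧ (∀ j : Int, PySem.Set.contains (evs.foldl bLabelStep (PySem.Set.empty, [])).1 j
            = ((evs.foldl bLabelStep (PySem.Set.empty, [])).2).contains j)
      ∧ (∀ j : Int, j ∈ (evs.foldl bLabelStep (PySem.Set.empty, [])).2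
            ↔ 0 < evs.countP (fun e => e.1 == some j)) := by
  induction evs using List.reverseRecOn with
  | nil =>
    refine ⟨rfl, fun j => rfl, fun j => ?_⟩
    simp [PySem.Set.empty]
  | append_singleton evs e ih =>
    obtain ⟨h1, h2, h3⟩ := ih
    obtain ⟨c, b⟩ := e
    set st := evs.foldl bLabelStep (PySem.Set.empty, []) with hst
    set A := evs.foldl aStep PySem.Dict.empty with hA
    rw [List.foldl_append, List.foldl_append]
    simp only [List.foldl_cons, List.foldl_nil]
    have hAmk : A = ⟨st.2.map (fun j => (j, bVal evs j))⟩ := PySem.Dict.ext h1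
    cases c with
    | none =>
      -- the event carries no label: nothing changes on either side
      have hval : ∀ j, bVal (evs ++ [(none, b)]) j = bVal evs j := by
        intro j
        simp [bVal, List.any_append, List.countP_append]
      refine ⟨?_, h2, ?_⟩
      · show A.items = st.2.map (fun j => (j, bVal (evs ++ [(none, b)]) j))
        rw [h1]; exact (List.map_congr_left fun j _ => by rw [hval]).symm
      · intro j
        show j ∈ st.2 ↔ _
        rw [h3 j]
        simp [List.countP_append]
    | some i =>
      show (aStep A (some i, b)).items
          = (bLabelStep st (some i, b)).2.map (fun j => (j, bVal (evs ++ [(some i, b)]) j))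
        ∧ (∀ j, PySem.Set.contains (bLabelStep st (some i, b)).1 j
              = (bLabelStep st (some i, b)).2.contains j)
        ∧ (∀ j, j ∈ (bLabelStep st (some i, b)).2
              ↔ 0 < (evs ++ [(some i, b)]).countP (fun e => e.1 == some j))
      have hvne : ∀ j, j ≠ i → bVal (evs ++ [(some i, b)]) j = bVal evs j := by
        intro j hj
        have : ((some i : Option Int) == some j) = false := by simp [Ne.symm hj]
        simp [bVal, List.any_append, List.countP_append, this]
      have hcnt_i : (evs ++ [(some i, b)]).countP (fun e => e.1 == some i)
          = evs.countP (fun e => e.1 == some i) + 1 := by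
        simp [List.countP_append]
      by_cases hmem : i ∈ st.2
      · -- label already listed
        have hseen : PySem.Set.contains st.1 i = true := by
          rw [h2 i]; exact List.contains_iff_mem.mpr hmem
        have hBeq : bLabelStep st (some i, b) = st := by
          show (if PySem.Set.contains st.1 i then st else (PySem.Set.add st.1 i, st.2 ++ [i])) = st
          rw [hseen]; simp
        have hgetD : A.getD i 0 = bVal evs i := by
          rw [hAmk, PySem.Dict.getD_eq_get?_getD]
          show (PySem.Dict.get? ⟨st.2.map (fun j => (j, bVal evs j))⟩ i).getD 0 = _
          rw [dict_get?_map_label st.2 (bVal evs) i, if_pos hmem]; rfl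
        by_cases hany : evs.any (fun e => e.1 == some i && e.2) = true
        · -- already -1: A skips, B's border query stays true
          have hval_i : bVal evs i = -1 := by simp [bVal, hany]
          have hAeq : aStep A (some i, b) = A := by
            show (if (A.getD i 0 == -1) then A
                  else A.insert i (if b then -1 else A.getD i 0 + 1)) = A
            rw [hgetD, hval_i]; simp
          have hval_i' : bVal (evs ++ [(some i, b)]) i = -1 := by
            simp [bVal, List.any_append, hany]
          rw [hAeq, hBeq]
          refine ⟨?_, h2, ?_⟩
          · rw [h1]
            apply List.map_congr_left
            intro j _
            by_cases hj : j = i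
            · subst hj; rw [hval_i, hval_i']
            · rw [hvne j hj]
          · intro j
            rw [h3 j, List.countP_append]
            by_cases hj : j = i
            · subst hj
              have hp := (h3 _).mp hmem
              constructor <;> intro <;> omega
            · have : ((some i : Option Int) == some j) = false := by simp [Ne.symm hj]
              simp [this]
        · -- counting so far: A bumps or marks in place, matching B's queries on evs ++ [e]
          have hany' : evs.any (fun e => e.1 == some i && e.2) = false := by
            cases hx : (evs.any fun e => e.1 == some i && e.2) with
            | false => rfl
            | true => exact absurd hx hany
          have hval_i : bVal evs i = (evs.countP (fun e => e.1 == some i) : Int) := by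
            simp [bVal, hany']
          have hne : (A.getD i 0 == -1) = false := by
            rw [hgetD, hval_i]; simp
          have hcontA : A.contains i = true := by
            rw [hAmk, PySem.Dict.contains_eq_isSome_get?,
              dict_get?_map_label st.2 (bVal evs) i, if_pos hmem]
            rfl
          have hval_i' : bVal (evs ++ [(some i, b)]) i
              = if b then -1 else (evs.countP (fun e => e.1 == some i) : Int) + 1 := by
            simp only [bVal, List.any_append, hany', hcnt_i]
            cases b <;> simp
          have hAeq : aStep A (some i, b)
              = A.insert i (if b then -1 else A.getD i 0 + 1) := by
            show (if (A.getD i 0 == -1) then A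
                  else A.insert i (if b then -1 else A.getD i 0 + 1)) = _
            rw [hne]; simp
          rw [hAeq, hBeq]
          refine ⟨?_, h2, ?_⟩
          · rw [PySem.Dict.items_insert, hcontA, if_pos rfl, h1, List.map_map]
            apply List.map_congr_left
            intro j hjmem
            by_cases hj : j = i
            · subst hj
              simp only [Function.comp_apply, beq_self_eq_true, if_true]
              rw [hgetD, hval_i, hval_i']
            · have hjb : (j == i) = false := by simp [hj]
              simp only [Function.comp_apply, hjb, Bool.false_eq_true, if_false]
              rw [hvne j hj]
          · intro j
            rw [h3 j, List.countP_append]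
            by_cases hj : j = i
            · subst hj
              have hp := (h3 _).mp hmem
              constructor <;> intro <;> omega
            · have : ((some i : Option Int) == some j) = false := by simp [Ne.symm hj]
              simp [this]
      · -- fresh label: both sides append
        have hseen : PySem.Set.contains st.1 i = false := by
          rw [h2 i]
          simp only [List.contains_eq_mem, decide_eq_false_iff_not]
          exact hmem
        have hBeq : bLabelStep st (some i, b) = (PySem.Set.add st.1 i, st.2 ++ [i]) := by
          show (if PySem.Set.contains st.1 i then st else (PySem.Set.add st.1 i, st.2 ++ [i])) = _
          rw [hseen]; simp
        have hcnt0 : evs.countP (fun e => e.1 == some i) = 0 := by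
          by_contra h
          exact hmem ((h3 i).mpr (Nat.pos_of_ne_zero h))
        have hani := List.countP_eq_zero.mp hcnt0
        have hany' : evs.any (fun e => e.1 == some i && e.2) = false := by
          rw [List.any_eq_false]
          intro e he hp
          have h1p : (e.1 == some i) = true := by
            cases hand : (e.1 == some i) with
            | true => rfl
            | false => simp [hand] at hp
          exact hani e he h1p
        have hgetD : A.getD i 0 = 0 := by
          rw [hAmk, PySem.Dict.getD_eq_get?_getD]
          show (PySem.Dict.get? ⟨st.2.map (fun j => (j, bVal evs j))⟩ i).getD 0 = _
          rw [dict_get?_map_label st.2 (bVal evs) i, if_neg hmem]; rfl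
        have hcontA : A.contains i = false := by
          rw [hAmk, PySem.Dict.contains_eq_isSome_get?,
            dict_get?_map_label st.2 (bVal evs) i, if_neg hmem]
          rfl
        have hval_i' : bVal (evs ++ [(some i, b)]) i = if b then -1 else 1 := by
          simp only [bVal, List.any_append, hany', hcnt_i, hcnt0]
          cases b <;> simp
        have hne : (A.getD i 0 == -1) = false := by rw [hgetD]; rfl
        have hAeq : aStep A (some i, b)
            = A.insert i (if b then -1 else A.getD i 0 + 1) := by
          show (if (A.getD i 0 == -1) then A
                else A.insert i (if b then -1 else A.getD i 0 + 1)) = _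
          rw [hne]; simp
        rw [hAeq, hBeq]
        refine ⟨?_, ?_, ?_⟩
        · rw [PySem.Dict.items_insert, hcontA]
          simp only [Bool.false_eq_true, if_false]
          rw [h1, List.map_append, List.map_cons, List.map_nil]
          congr 1
          · apply List.map_congr_left
            intro j hjmem
            have hj : j ≠ i := fun h => hmem (h ▸ hjmem)
            rw [hvne j hj]
          · rw [hgetD, hval_i']
            cases b <;> norm_num
        · intro j
          show PySem.Set.contains (PySem.Set.add st.1 i) j = (st.2 ++ [i]).contains j
          rw [set_contains_add, h2 j]
          by_cases hj : j = i <;> simp [hj, List.contains_eq_mem]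
        · intro j
          show j ∈ st.2 ++ [i] ↔ _
          rw [List.mem_append, List.countP_append, h3 j]
          by_cases hj : j = i
          · subst hj
            simp [hcnt0]
          · have : ((some i : Option Int) == some j) = false := by simp [Ne.symm hj]
            simp [this, hj]

-- Bridging: A's nested loops over the grid are the fold of aStep over B's flattened event
-- list, so the invariant above yields the equivalence.
theorem nested_eq (Y X : List Int) (cell : Int → Int → Option Int) (bd : Int → Int → Bool) :
    (Y.foldl (fun area y => X.foldl (fun area x =>
        match cell x y with
        | none => area
        | some i =>
          let a := area.getD i 0
          if a == -1 then area
          else area.insert i (if bd x y then -1 else a + 1)) area) PySem.Dict.empty).items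
    = ((Y.flatMap (fun y => X.map (fun x => (cell x y, bd x y)))).foldl bLabelStep
          (PySem.Set.empty, [])).2.map
        (fun i => (i, bVal (Y.flatMap (fun y => X.map (fun x => (cell x y, bd x y)))) i)) := by
  have hb : ∀ (acc : PySem.Dict Int Int) (y : Int),
      (X.map (fun x => (cell x y, bd x y))).foldl aStep acc
        = X.foldl (fun area x =>
            match cell x y with
            | none => area
            | some i =>
              let a := area.getD i 0
              if a == -1 then area
              else area.insert i (if bd x y then -1 else a + 1)) acc := by
    intro acc y
    rw [List.foldl_map]
    rfl
  have hA : (Y.flatMap (fun y => X.map (fun x => (cell x y, bd x y)))).foldl aStep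
        PySem.Dict.empty
      = Y.foldl (fun area y => X.foldl (fun area x =>
          match cell x y with
          | none => area
          | some i =>
            let a := area.getD i 0
            if a == -1 then area
            else area.insert i (if bd x y then -1 else a + 1)) area) PySem.Dict.empty := by
    rw [List.foldl_flatMap]
    simp only [hb]
  rw [← hA]
  exact (fold_invariant _).1

theorem area_equiv (m : List (List (Option Int × Int))) :
    area_per_point m = area_per_point_alt m :=
  nested_eq
    (PySem.List.pyRange 0 ((((PySem.List.pyGetD m 0 []).length : Int) - 1) + 1) 1)
    (PySem.List.pyRange 0 (((m.length : Int) - 1) + 1) 1)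
    (fun x y => (PySem.List.pyGetD (PySem.List.pyGetD m x []) y (none, 0)).1)
    (fun x y => x == 0 || y == 0 || x == (m.length : Int) - 1 ||
      y == ((PySem.List.pyGetD m 0 []).length : Int) - 1)

-- ===== VERDICT (by name: the statement is the Claim_ definition above) =====
theorem area_per_point_spec : Claim_equal_area_per_point := by
  intro m _ _
  unfold Spec_area_per_point
  exact area_equiv m
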